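-- pv_equiv track=rewrite | github.com/walter-rothlin/Source-Code | Python_WaltisExamples/Code_06_Pi_Plates/waltisLibrary.py | getPrevPrimzahl
-- ===== SOURCE A (Python) =====
-- def isPrimzahl(aZahl):
--     isPrim = True
--     if (aZahl == 1):
--         isPrim = True
--     else:
--         if (aZahl == 2):
--             isPrim = True
--         else:
--             obergrenze = int((aZahl / 2) + 2)
--             for i in range(2,obergrenze):
--                 if ((aZahl % i) == 0):
--                     isPrim = False
--     return isPrim
--
-- def getPrevPrimzahl(zahl):
--     aZahl = zahl - 1
--     if (aZahl <= 1):
--         return 1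
--     else:
--         while (isPrimzahl(aZahl) == False):
--             aZahl = aZahl - 1
--     return aZahl
-- ===== SOURCE B (Python) =====
-- def _is_prime(n):
--     d = 2
--     while d * d <= n:
--         if n % d == 0:
--             return False
--         d += 1
--     return True
--
-- def getPrevPrimzahl(zahl):
--     n = zahl - 1
--     if n <= 1:
--         return 1
--     while not _is_prime(n):
--         n -= 1
--     return n
-- ===== Notes on version B (the rewrite author's own statement) =====
-- stated objective: faster
-- what changed: Primality test inside the downward search replaced: A scans all candidate divisors up to half the number with no early exit, B trial-divides only up to its square root and returns at the first divisor found.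
import Mathlib
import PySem

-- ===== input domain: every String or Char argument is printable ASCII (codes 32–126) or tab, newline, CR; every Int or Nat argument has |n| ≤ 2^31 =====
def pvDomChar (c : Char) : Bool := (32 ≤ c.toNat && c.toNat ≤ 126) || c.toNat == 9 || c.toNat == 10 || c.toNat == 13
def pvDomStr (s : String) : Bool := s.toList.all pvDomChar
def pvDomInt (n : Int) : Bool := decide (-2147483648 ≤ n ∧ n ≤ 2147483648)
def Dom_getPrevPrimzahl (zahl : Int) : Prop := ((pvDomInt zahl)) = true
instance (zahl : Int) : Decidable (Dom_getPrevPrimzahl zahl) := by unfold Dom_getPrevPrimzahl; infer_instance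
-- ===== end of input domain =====

-- B replaces A's full divisor scan up to n/2+2 (no early exit) by trial division with
-- early exit while d*d <= n; the downward search itself is unchanged.
-- Proved exactly equal on all Int inputs in the domain.

-- ===== PORT A =====
-- isPrimzahl: 'int(aZahl / 2 + 2)'. Within the domain the float arithmetic is exact
-- (|aZahl| ≤ 2^31 < 2^53) and, for the nonnegative arguments this function is reached with
-- (aZahl = zahl - 1 ≥ 2), truncation toward zero of aZahl/2 + 2 equals floor(aZahl/2) + 2,
-- ported as PySem.Int.floordiv aZahl 2 + 2.
def isPrimzahl (aZahl : Int) : Bool :=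
  if aZahl == 1 then true
  else if aZahl == 2 then true
  else
    (PySem.List.pyRange 2 (PySem.Int.floordiv aZahl 2 + 2) 1).foldl
      (fun isPrim i => if PySem.Int.mod aZahl i == 0 then false else isPrim) true

-- 'while (isPrimzahl(aZahl) == False): aZahl = aZahl - 1', as structural descent on Nat:
-- the loop is entered only with aZahl ≥ 2 and stops at 2 at the latest (isPrimzahl 2 = true),
-- so aZahl stays positive and the Nat encoding is exact; the 0 case is never reached.
def getPrevPrimzahlLoop : Nat → Int
  | 0 => 0
  | m + 1 =>
      if isPrimzahl (Int.ofNat (m + 1)) == false then getPrevPrimzahlLoop m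
      else Int.ofNat (m + 1)

def getPrevPrimzahl (zahl : Int) : Int :=
  let aZahl := zahl - 1
  if aZahl ≤ 1 then 1
  else getPrevPrimzahlLoop aZahl.toNat   -- aZahl ≥ 2, toNat exact

-- ===== PORT B =====
-- 'd = 2; while d * d <= n: if n % d == 0: return False; d += 1; return True'
-- The while loop carries a fuel counter only to make it total: started with fuel n.toNat
-- at d = 2, fuel can only run out once d*d <= n is false, so fuel 0 returning True is
-- exactly the loop's normal exit (proved in trialDiv_true_iff below).
def trialDiv (n : Int) (d : Int) : Nat → Bool
  | 0 => true
  | c + 1 =>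
      if d * d ≤ n then
        if PySem.Int.mod n d == 0 then false
        else trialDiv n (d + 1) c
      else true

def isPrimeTrial (n : Int) : Bool := trialDiv n 2 n.toNat

-- 'while not _is_prime(n): n -= 1', same structural descent as A's loop (n stays ≥ 2)
def getPrevPrimzahlAltLoop : Nat → Int
  | 0 => 0
  | m + 1 =>
      if !(isPrimeTrial (Int.ofNat (m + 1))) then getPrevPrimzahlAltLoop m
      else Int.ofNat (m + 1)

def getPrevPrimzahl_alt (zahl : Int) : Int :=
  let n := zahl - 1
  if n ≤ 1 then 1
  else getPrevPrimzahlAltLoop n.toNat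

-- ===== PRECONDITION & SPEC =====
def Spec_getPrevPrimzahl (zahl : Int) (out : Int) : Prop := out = getPrevPrimzahl_alt zahl
instance (zahl : Int) (out : Int) : Decidable (Spec_getPrevPrimzahl zahl out) := by unfold Spec_getPrevPrimzahl; infer_instance

-- ===== CLAIM (what is proved, stated in full; the proofs are below) =====
def Claim_equal_getPrevPrimzahl : Prop := ∀ (zahl : Int), Dom_getPrevPrimzahl zahl → Spec_getPrevPrimzahl zahl (getPrevPrimzahl zahl)

-- ===== LEMMAS AND PROOFS =====

theorem isPrimzahl_nonpos (a : Int) (h : a ≤ 0) : isPrimzahl a = true := by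
  unfold isPrimzahl
  rw [if_neg (by simp; omega), if_neg (by simp; omega)]
  have h2 : ¬ (1 ≤ PySem.Int.floordiv a 2) := by
    rw [PySem.Int.le_floordiv_iff_mul_le (by omega)]; omega
  rw [PySem.List.pyRange_one_eq_nil (by omega)]
  rfl

theorem isPrimeTrial_small (a : Int) (h : a ≤ 3) : isPrimeTrial a = true := by
  unfold isPrimeTrial
  cases hc : a.toNat with
  | zero => rfl
  | succ c => rw [trialDiv, if_neg (by omega)]

-- A's for-loop accumulates 'isPrim stays true unless some divisor is seen'
theorem foldA_eq_all (a : Int) (l : List Int) (acc : Bool) :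
    l.foldl (fun isPrim i => if PySem.Int.mod a i == 0 then false else isPrim) acc
      = (acc && l.all (fun i => !(PySem.Int.mod a i == 0))) := by
  induction l generalizing acc with
  | nil => simp
  | cons x xs ih =>
      simp only [List.foldl_cons, List.all_cons, ih]
      by_cases h : PySem.Int.mod a x == 0 <;> simp [h]

theorem isPrimzahl_true_iff (a : Int) (ha : 3 ≤ a) :
    isPrimzahl a = true ↔
      ∀ i : Int, 2 ≤ i → i < PySem.Int.floordiv a 2 + 2 → ¬ (i ∣ a) := by
  unfold isPrimzahl
  rw [if_neg (by simp; omega), if_neg (by simp; omega)]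
  simp only [foldA_eq_all, Bool.true_and, List.all_eq_true, PySem.List.mem_pyRange_one]
  constructor
  · intro h i h2 hlt hdvd
    have := h i ⟨h2, hlt⟩
    rw [(PySem.Int.mod_eq_zero_iff_dvd a i).mpr hdvd] at this
    simp at this
  · intro h i hi
    have := h i hi.1 hi.2
    simp only [Bool.not_eq_eq_eq_not, Bool.not_true, beq_eq_false_iff_ne, ne_eq]
    intro hz
    exact this ((PySem.Int.mod_eq_zero_iff_dvd a i).mp hz)

theorem trialDiv_true_iff (n : Int) (c : Nat) : ∀ (d : Int), 2 ≤ d → (n + 1 - d).toNat ≤ c →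
    (trialDiv n d c = true ↔ ∀ e : Int, d ≤ e → e * e ≤ n → ¬ (e ∣ n)) := by
  induction c with
  | zero =>
      intro d hd hc
      rw [trialDiv]
      simp only [true_iff]
      intro e he hee hdvd
      have h1 : n + 1 ≤ d := by omega
      have h2 : e ≤ e * e := by nlinarith
      omega
  | succ c ih =>
      intro d hd hc
      rw [trialDiv]
      by_cases hdd : d * d ≤ n
      · rw [if_pos hdd]
        by_cases hmod : PySem.Int.mod n d == 0
        · rw [if_pos hmod]
          simp only [Bool.false_eq_true, false_iff]
          intro h
          exact h d le_rfl hdd ((PySem.Int.mod_eq_zero_iff_dvd n d).mp (by simpa using hmod))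
        · rw [if_neg hmod]
          have hdn : d ≤ n := by nlinarith
          rw [ih (d + 1) (by omega) (by omega)]
          constructor
          · intro h e he hee
            rcases eq_or_lt_of_le he with heq | hlt
            · subst heq
              intro hdvd
              exact absurd ((PySem.Int.mod_eq_zero_iff_dvd n d).mpr hdvd)
                (by simpa using hmod)
            · exact h e (by omega) hee
          · intro h e he hee
            exact h e (by omega) hee
      · rw [if_neg hdd]
        simp only [true_iff]
        intro e he hee hdvd
        nlinarith

-- the two primality tests agree on every integer
theorem isPrim_agree (a : Int) : isPrimzahl a = isPrimeTrial a := by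
  rcases le_or_gt a 3 with hle | hgt
  · rw [isPrimeTrial_small a hle]
    rcases le_or_gt a 0 with h0 | h0
    · exact isPrimzahl_nonpos a h0
    · interval_cases a <;> decide
  · have ha : 3 ≤ a := by omega
    have hfd : PySem.Int.floordiv a 2 = a / 2 := PySem.Int.floordiv_eq_ediv_of_pos (by omega)
    unfold isPrimeTrial
    rw [Bool.eq_iff_iff, isPrimzahl_true_iff a ha,
        trialDiv_true_iff a a.toNat 2 (le_refl 2) (by omega)]
    constructor
    · intro h e h2 hee hdvd
      refine h e h2 ?_ hdvd
      have : e * 2 ≤ a := by nlinarith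
      rw [hfd]; omega
    · intro h i h2 hlt hdvd
      rcases hdvd with ⟨k, hk⟩
      have hipos : 0 < i := by omega
      have hia : i < a := by rw [hfd] at hlt; omega
      have hkpos : 0 < k := by nlinarith
      have hk2 : 2 ≤ k := by
        rcases eq_or_lt_of_le (by omega : 1 ≤ k) with heq | h1
        · exfalso; rw [← heq, mul_one] at hk; omega
        · omega
      rcases le_or_gt (i * i) a with hii | hii
      · exact h i h2 hii ⟨k, hk⟩
      · have hki : k < i := by nlinarith
        have hkk : k * k ≤ a := by nlinarith
        exact h k hk2 hkk ⟨i, by linarith [hk, mul_comm i k]⟩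

theorem loops_agree (m : Nat) : getPrevPrimzahlLoop m = getPrevPrimzahlAltLoop m := by
  induction m with
  | zero => rfl
  | succ m ih =>
      rw [getPrevPrimzahlLoop, getPrevPrimzahlAltLoop, isPrim_agree]
      cases h : isPrimeTrial (Int.ofNat (m + 1)) <;> simp [ih]

-- ===== VERDICT (by name: the statement is the Claim_ definition above) =====
theorem getPrevPrimzahl_spec : Claim_equal_getPrevPrimzahl := by
  intro zahl _
  unfold Spec_getPrevPrimzahl getPrevPrimzahl getPrevPrimzahl_alt
  simp only []
  split
  · rfl
  · exact loops_agree (zahl - 1).toNat
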